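-- pv_equiv track=rewrite | github.com/tonyvu2014/algorithm | miscellaneous/common_squares.py | find_common_squares_list
-- ===== SOURCE A (Python) =====
-- from collections import defaultdict
--
-- def find_common_squares_list(list1, list2):
--
--     square_to_root = defaultdict(list)
--     is_square_from_list_1 = defaultdict(bool)
--
--     for x in list1:
--         square_to_root[x*x] += [x]
--         is_square_from_list_1[x*x] = True
--
--     common_squares_list = []
--
--     for l in list2:
--         if is_square_from_list_1[l]:
--             common_squares_list.extend(square_to_root[l])
--
--     return common_squares_list
-- ===== SOURCE B (Python) =====
-- def find_common_squares_list(list1, list2):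
--     # Dictionary-free nested scan: for each l in list2 (in order), append every
--     # x from list1 (in order) with x*x == l.  Same order & multiplicity as A.
--     result = []
--     for l in list2:
--         for x in list1:
--             if x * x == l:
--                 result.append(x)
--     return result
-- ===== Notes on version B (the rewrite author's own statement) =====
-- stated objective: simpler
-- what changed: Replaced the two defaultdict indexes (square->roots list and square->flag) with a direct nested scan over list2 then list1, appending x whenever x*x equals the list2 element.
import Mathlib
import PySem

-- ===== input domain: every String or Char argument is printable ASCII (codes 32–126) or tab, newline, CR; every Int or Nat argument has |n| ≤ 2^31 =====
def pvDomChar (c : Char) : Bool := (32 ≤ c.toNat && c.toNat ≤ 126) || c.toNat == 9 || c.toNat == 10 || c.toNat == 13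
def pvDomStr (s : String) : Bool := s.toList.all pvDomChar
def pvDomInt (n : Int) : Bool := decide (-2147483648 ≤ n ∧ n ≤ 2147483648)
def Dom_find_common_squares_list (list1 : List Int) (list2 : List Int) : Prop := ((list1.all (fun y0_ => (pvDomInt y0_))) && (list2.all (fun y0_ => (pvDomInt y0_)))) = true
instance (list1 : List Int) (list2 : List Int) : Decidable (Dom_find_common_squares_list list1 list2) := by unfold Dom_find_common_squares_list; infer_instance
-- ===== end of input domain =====

-- B replaces A's two defaultdict indexes with a plain nested scan (simpler, no index built).

-- ===== PORT A =====
-- square_to_root[x*x] += [x]  ≙ modify with default [] (defaultdict(list));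
-- is_square_from_list_1[x*x] = True ≙ insert; reading either defaultdict ≙ getD with its default.
def find_common_squares_list (list1 : List Int) (list2 : List Int) : List Int :=
  let square_to_root :=
    list1.foldl (fun d x => d.modify (x * x) [] (· ++ [x])) (PySem.Dict.empty : PySem.Dict Int (List Int))
  let is_square_from_list_1 :=
    list1.foldl (fun d x => d.insert (x * x) true) (PySem.Dict.empty : PySem.Dict Int Bool)
  list2.foldl
    (fun common_squares_list l =>
      if is_square_from_list_1.getD l false then
        common_squares_list ++ square_to_root.getD l []
      else common_squares_list)
    []

-- ===== PORT B =====
def find_common_squares_list_alt (list1 : List Int) (list2 : List Int) : List Int :=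
  list2.foldl
    (fun result l =>
      list1.foldl (fun result x => if x * x = l then result ++ [x] else result) result)
    []

-- ===== PRECONDITION & SPEC =====
def Spec_find_common_squares_list (list1 : List Int) (list2 : List Int) (out : List Int) : Prop := out = find_common_squares_list_alt list1 list2
instance (list1 : List Int) (list2 : List Int) (out : List Int) : Decidable (Spec_find_common_squares_list list1 list2 out) := by unfold Spec_find_common_squares_list; infer_instance

-- ===== CLAIM (what is proved, stated in full; the proofs are below) =====
def Claim_equal_find_common_squares_list : Prop := ∀ (list1 : List Int) (list2 : List Int), Dom_find_common_squares_list list1 list2 → Spec_find_common_squares_list list1 list2 (find_common_squares_list list1 list2)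

-- ===== LEMMAS AND PROOFS =====

-- The roots dictionary characterised: lookup at l is the ordered filter of list1.
theorem pv_roots_getD (list1 : List Int) (d : PySem.Dict Int (List Int)) (l : Int) :
    (list1.foldl (fun d x => d.modify (x * x) [] (· ++ [x])) d).getD l []
      = d.getD l [] ++ list1.filter (fun x => x * x == l) := by
  induction list1 generalizing d with
  | nil => simp
  | cons a t ih =>
    simp only [List.foldl_cons, List.filter_cons, ih]
    rw [PySem.Dict.getD_modify]
    by_cases h : a * a == l
    · have hl : l = a * a := by simpa [eq_comm] using (beq_iff_eq.mp h)
      simp [hl]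
    · have hl : ¬ l = a * a := by
        intro he; exact h (by simp [he])
      simp [hl, h]

-- The flag dictionary characterised: lookup at l is list1.any (x*x == l).
theorem pv_flag_getD (list1 : List Int) (d : PySem.Dict Int Bool) (l : Int) :
    (list1.foldl (fun d x => d.insert (x * x) true) d).getD l false
      = (d.getD l false || list1.any (fun x => x * x == l)) := by
  induction list1 generalizing d with
  | nil => simp
  | cons a t ih =>
    simp only [List.foldl_cons, List.any_cons, ih]
    rw [PySem.Dict.getD_insert]
    by_cases h : a * a == l
    · have hl : l = a * a := by simpa [eq_comm] using (beq_iff_eq.mp h)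
      simp [hl]
    · have hl : ¬ l = a * a := by
        intro he; exact h (by simp [he])
      simp [hl, h]

-- B's inner scan appends the ordered filter of list1.
theorem pv_inner_foldl (list1 : List Int) (acc : List Int) (l : Int) :
    list1.foldl (fun r x => if x * x = l then r ++ [x] else r) acc
      = acc ++ list1.filter (fun x => x * x == l) := by
  induction list1 generalizing acc with
  | nil => simp
  | cons a t ih =>
    by_cases h : a * a = l <;> simp [List.foldl_cons, ih, h]

theorem pv_agree (list1 list2 : List Int) (acc : List Int) :
    list2.foldl
      (fun c l =>
        if (list1.foldl (fun d x => d.insert (x * x) true) (PySem.Dict.empty : PySem.Dict Int Bool)).getD l false then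
          c ++ (list1.foldl (fun d x => d.modify (x * x) [] (· ++ [x])) (PySem.Dict.empty : PySem.Dict Int (List Int))).getD l []
        else c) acc
    = list2.foldl
        (fun r l => list1.foldl (fun r x => if x * x = l then r ++ [x] else r) r) acc := by
  induction list2 generalizing acc with
  | nil => rfl
  | cons l t ih =>
    simp only [List.foldl_cons]
    rw [pv_inner_foldl, pv_flag_getD, pv_roots_getD, ih]
    by_cases h : list1.any (fun x => x * x == l)
    · simp [h]
    · have h' : ∀ x ∈ list1, ¬ (x * x = l) := by simpa using h
      have hf : list1.filter (fun x => x * x == l) = [] := by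
        rw [List.filter_eq_nil_iff]
        intro x hx
        simpa using h' x hx
      simp [h, hf]

-- ===== VERDICT (by name: the statement is the Claim_ definition above) =====
theorem find_common_squares_list_spec : Claim_equal_find_common_squares_list := by
  intro list1 list2 _
  show find_common_squares_list list1 list2 = find_common_squares_list_alt list1 list2
  unfold find_common_squares_list find_common_squares_list_alt
  exact pv_agree list1 list2 []
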